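-- pv_equiv track=rewrite | github.com/ohadrozen/inferbert | source/TemplateProcessor.py | inst2str
-- ===== SOURCE A (Python) =====
-- def inst2str(instances):
--     prev_groups = instances[0][1]
--     if prev_groups:
--         s = '<' + ','.join(prev_groups) + ': '
--     else:
--         s = ''
--     for inst, groups in instances:
--         inst_t = inst if inst else '\"\"'
--         if groups == prev_groups:
--             s += inst_t + '; '
--         else:
--             prev_groups = groups
--             s = s[:-2]
--             s += '>; <' + ','.join(prev_groups) + ': ' + inst_t + '; '
--     if prev_groups:
--         s = s[:-2] + '>'
--     return s
-- ===== SOURCE B (Python) =====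
-- from itertools import groupby
--
-- def inst2str(instances):
--     runs = [(g, [i if i else '""' for i, _ in grp])
--             for g, grp in groupby(instances, key=lambda x: x[1])]
--     last = len(runs) - 1
--     parts = []
--     for idx, (g, insts) in enumerate(runs):
--         head = '' if (idx == 0 and not g) else '<' + ','.join(g) + ': '
--         tail = '; ' if (idx == last and not g) else '>'
--         parts.append(head + '; '.join(insts) + tail)
--     return '; '.join(parts)
-- ===== Notes on version B (the rewrite author's own statement) =====
-- stated objective: faster
-- what changed: B first groups the input into runs of consecutive equal group-lists (itertools.groupby) and then renders each run as one segment with first/last-run rules, joining segments with '; ', instead of A's single stateful loop that repeatedly truncates the accumulated string with s[:-2] at run boundaries.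
import Mathlib
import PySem

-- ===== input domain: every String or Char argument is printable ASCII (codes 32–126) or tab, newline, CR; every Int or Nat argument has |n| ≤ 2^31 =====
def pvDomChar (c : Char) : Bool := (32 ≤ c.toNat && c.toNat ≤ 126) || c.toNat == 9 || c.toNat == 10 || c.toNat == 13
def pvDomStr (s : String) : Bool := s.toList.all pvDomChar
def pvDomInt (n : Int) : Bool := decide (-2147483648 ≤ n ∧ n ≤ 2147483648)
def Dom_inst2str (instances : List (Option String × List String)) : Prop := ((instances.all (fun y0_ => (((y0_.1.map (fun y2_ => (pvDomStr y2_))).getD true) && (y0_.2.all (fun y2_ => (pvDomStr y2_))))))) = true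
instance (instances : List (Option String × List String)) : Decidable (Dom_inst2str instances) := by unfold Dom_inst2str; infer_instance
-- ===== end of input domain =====

-- B replaces A's single stateful loop (which truncates s[:-2] at run boundaries) by
-- group-into-runs-then-render-segments; equivalence proved for nonempty input (A raises IndexError on []).


-- ===== PORT A =====
-- inst_t = inst if inst else '""'  (None or "" both render as the two-character string "")
def pvInstT (inst : Option String) : List Char :=
  match inst with
  | some t => if t = "" then ['"', '"'] else t.toList
  | none => ['"', '"']

-- the body of A's for-loop, on state (prev_groups, s)
def pvStepA (st : List String × List Char) (p : Option String × List String) :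
    List String × List Char :=
  if p.2 = st.1 then
    (st.1, st.2 ++ pvInstT p.1 ++ [';', ' '])
  else
    (p.2, PySem.List.slice st.2 none (some (-2)) ++ ['>', ';', ' ', '<']
      ++ PySem.Chars.join [','] (p.2.map String.toList) ++ [':', ' ']
      ++ pvInstT p.1 ++ [';', ' '])

def inst2str (instances : List (Option String × List String)) : String :=
  match instances with
  | [] => ""   -- Python raises IndexError on instances[0]; excluded by Pre_inst2str
  | first :: _ =>
    let prev0 := first.2
    let s0 : List Char :=
      if prev0 = [] then []
      else '<' :: (PySem.Chars.join [','] (prev0.map String.toList) ++ [':', ' '])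
    let st := instances.foldl pvStepA (prev0, s0)
    String.ofList
      (if st.1 = [] then st.2 else PySem.List.slice st.2 none (some (-2)) ++ ['>'])

-- ===== PORT B =====
-- one run-segment: '<g1,…: ' head (omitted for an empty-group FIRST run),
-- insts joined by '; ', '>' tail ('; ' for an empty-group LAST run)
def pvRenderRun (isFirst isLast : Bool) (g : List String) (insts : List (List Char)) :
    List Char :=
  let head :=
    if isFirst && g.isEmpty then []
    else '<' :: (PySem.Chars.join [','] (g.map String.toList) ++ [':', ' '])
  let tail := if isLast && g.isEmpty then [';', ' '] else ['>']
  head ++ PySem.Chars.join [';', ' '] insts ++ tail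

def pvRenderRuns : Bool → List (List (Option String × List String)) → List (List Char)
  | _, [] => []
  | isFirst, r :: rest =>
    pvRenderRun isFirst rest.isEmpty ((r.headD (none, [])).2)
        (r.map (fun p => pvInstT p.1))
      :: pvRenderRuns false rest

def inst2str_alt (instances : List (Option String × List String)) : String :=
  String.ofList (PySem.Chars.join [';', ' ']
    (pvRenderRuns true (instances.splitBy (fun a b => a.2 == b.2))))

-- ===== PRECONDITION & SPEC =====
def Pre_inst2str (instances : List (Option String × List String)) : Prop :=
  instances ≠ []
instance (instances : List (Option String × List String)) : Decidable (Pre_inst2str instances) := by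
  unfold Pre_inst2str; infer_instance

def pvWitness_inst2str : (List (Option String × List String)) := [(some "a", ["g"])]

def Spec_inst2str (instances : List (Option String × List String)) (out : String) : Prop :=
  out = inst2str_alt instances
instance (instances : List (Option String × List String)) (out : String) : Decidable (Spec_inst2str instances out) := by
  unfold Spec_inst2str; infer_instance

-- ===== CLAIM (what is proved, stated in full; the proofs are below) =====
def Claim_equal_inst2str : Prop := ∀ (instances : List (Option String × List String)), Dom_inst2str instances → Pre_inst2str instances → Spec_inst2str instances (inst2str instances)

-- ===== LEMMAS AND PROOFS =====

-- what A's loop appends while staying inside one run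
def pvBody (l : List (Option String × List String)) : List Char :=
  l.flatMap (fun p => pvInstT p.1 ++ [';', ' '])

theorem pvDropTwo (x : List Char) (a b : Char) :
    PySem.List.slice (x ++ [a, b]) none (some (-2)) = x := by
  rw [PySem.List.slice_to_neg_ofNat _ 2 (by omega)]
  simp

theorem pvBody_eq_join (l : List (Option String × List String)) (h : l ≠ []) :
    pvBody l = PySem.Chars.join [';', ' '] (l.map (fun p => pvInstT p.1)) ++ [';', ' '] := by
  induction l with
  | nil => exact absurd rfl h
  | cons p tl ih =>
    cases tl with
    | nil => simp [pvBody, PySem.Chars.join_singleton]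
    | cons q tl' =>
      simp only [pvBody, List.flatMap_cons, List.map_cons] at *
      rw [PySem.Chars.join_cons_cons, ih (by simp)]
      simp

theorem pvChain_const (l : List (Option String × List String)) (g : List String)
    (h : ∀ p ∈ l, p.2 = g) :
    l.IsChain (fun a b => (a.2 == b.2) = true) := by
  induction l with
  | nil => exact List.isChain_nil
  | cons p tl ih =>
    cases tl with
    | nil => exact List.isChain_singleton _
    | cons q tl' =>
      have h1 : p.2 = g := h p List.mem_cons_self
      have h2 : q.2 = g := h q (List.mem_cons_of_mem _ List.mem_cons_self)
      exact List.isChain_cons_cons.2 ⟨by simp [h1, h2], ih (fun r hr => h r (List.mem_cons_of_mem _ hr))⟩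

theorem pvSplitBy_cons (p : Option String × List String)
    (tl : List (Option String × List String)) :
    (p :: tl).splitBy (fun a b => a.2 == b.2) =
      (p :: tl.takeWhile (fun q => q.2 == p.2))
        :: (tl.dropWhile (fun q => q.2 == p.2)).splitBy (fun a b => a.2 == b.2) := by
  have hrun : ∀ q ∈ p :: tl.takeWhile (fun q => q.2 == p.2), q.2 = p.2 := by
    intro q hq
    rcases List.mem_cons.1 hq with h | h
    · rw [h]
    · simpa using List.mem_takeWhile_imp h
  have hdecomp : p :: tl = (p :: tl.takeWhile (fun q => q.2 == p.2))
      ++ tl.dropWhile (fun q => q.2 == p.2) := by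
    simp [List.takeWhile_append_dropWhile]
  cases hrest : tl.dropWhile (fun q => q.2 == p.2) with
  | nil =>
    rw [List.splitBy_nil]
    conv_lhs => rw [hdecomp, hrest, List.append_nil]
    exact List.splitBy_of_isChain (by simp) (pvChain_const _ _ hrun)
  | cons q rest' =>
    conv_lhs => rw [hdecomp, hrest]
    rw [List.splitBy_append_cons]
    · rw [List.splitBy_of_isChain (by simp) (pvChain_const _ _ hrun)]
      simp
    · intro x hx
      have hxlast : x.2 = p.2 := hrun x (List.mem_of_mem_getLast? hx)
      have hq : ¬ ((q.2 == p.2) = true) := by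
        have := List.head_dropWhile_not (fun q => q.2 == p.2) (l := tl)
        rw [hrest] at this
        simpa using this (by simp)
      simp only [beq_iff_eq] at hq
      rw [beq_eq_false_iff_ne, hxlast]
      exact fun hc => hq (Eq.symm hc)

-- main invariant: finishing A's loop from state (g, s) over the rest of the input
theorem pvMain (n : Nat) :
    ∀ (l : List (Option String × List String)), l.length ≤ n → ∀ (g : List String) (s : List Char),
      (let st := l.foldl pvStepA (g, s);
       if st.1 = [] then st.2 else PySem.List.slice st.2 none (some (-2)) ++ ['>'])
      =
      (match l.dropWhile (fun q => q.2 == g) with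
       | [] =>
         if g = [] then s ++ pvBody (l.takeWhile (fun q => q.2 == g))
         else PySem.List.slice (s ++ pvBody (l.takeWhile (fun q => q.2 == g))) none (some (-2)) ++ ['>']
       | _ :: _ =>
         PySem.List.slice (s ++ pvBody (l.takeWhile (fun q => q.2 == g))) none (some (-2))
           ++ ['>', ';', ' ']
           ++ PySem.Chars.join [';', ' ']
               (pvRenderRuns false
                 ((l.dropWhile (fun q => q.2 == g)).splitBy (fun a b => a.2 == b.2)))) := by
  induction n with
  | zero =>
    intro l hl g s
    have : l = [] := List.length_eq_zero_iff.1 (Nat.le_zero.1 hl)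
    subst this
    simp [pvBody]
  | succ n ih =>
    intro l hl g s
    cases l with
    | nil => simp [pvBody]
    | cons p tl =>
      by_cases hp : p.2 = g
      · -- stays in the current run
        have htw : (p :: tl).takeWhile (fun q => q.2 == g) = p :: tl.takeWhile (fun q => q.2 == g) := by
          simp [hp]
        have hdw : (p :: tl).dropWhile (fun q => q.2 == g) = tl.dropWhile (fun q => q.2 == g) := by
          simp [hp]
        have hstep : (p :: tl).foldl pvStepA (g, s)
            = tl.foldl pvStepA (g, s ++ pvInstT p.1 ++ [';', ' ']) := by
          rw [List.foldl_cons]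
          congr 1
          simp [pvStepA, hp]
        rw [hstep]
        have := ih tl (by simpa using Nat.lt_succ_iff.1 (by simpa using hl)) g
          (s ++ pvInstT p.1 ++ [';', ' '])
        rw [this, htw, hdw]
        cases tl.dropWhile (fun q => q.2 == g) with
        | nil => simp [pvBody]
        | cons r rest => simp [pvBody]
      · -- run boundary: A truncates and opens a new bracket
        have htw : (p :: tl).takeWhile (fun q => q.2 == g) = [] := by
          simp [hp]
        have hdw : (p :: tl).dropWhile (fun q => q.2 == g) = p :: tl := by
          simp [hp]
        rw [htw, hdw]
        set X : List Char := PySem.List.slice s none (some (-2)) ++ ['>', ';', ' '] with hX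
        set hd : List Char := '<' :: (PySem.Chars.join [','] (p.2.map String.toList) ++ [':', ' ']) with hhd
        have hstep : (p :: tl).foldl pvStepA (g, s)
            = tl.foldl pvStepA (p.2, X ++ hd ++ pvInstT p.1 ++ [';', ' ']) := by
          rw [List.foldl_cons]
          congr 1
          simp [pvStepA, hp, hX, hhd]
        rw [hstep,
          ih tl (by simpa using Nat.lt_succ_iff.1 (by simpa using hl)) p.2
            (X ++ hd ++ pvInstT p.1 ++ [';', ' '])]
        rw [pvSplitBy_cons]
        set run2 := tl.takeWhile (fun q => q.2 == p.2) with hrun2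
        set rest2 := tl.dropWhile (fun q => q.2 == p.2) with hrest2
        have hbody : pvBody (p :: run2)
            = PySem.Chars.join [';', ' '] ((p :: run2).map (fun q => pvInstT q.1)) ++ [';', ' '] :=
          pvBody_eq_join _ (by simp)
        have hbody' : (X ++ hd ++ pvInstT p.1 ++ [';', ' ']) ++ pvBody run2
            = (X ++ hd ++ PySem.Chars.join [';', ' '] ((p :: run2).map (fun q => pvInstT q.1))) ++ [';', ' '] := by
          have : pvInstT p.1 ++ [';', ' '] ++ pvBody run2 = pvBody (p :: run2) := by
            simp [pvBody]
          calc (X ++ hd ++ pvInstT p.1 ++ [';', ' ']) ++ pvBody run2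
              = (X ++ hd) ++ (pvInstT p.1 ++ [';', ' '] ++ pvBody run2) := by
                simp [List.append_assoc]
            _ = (X ++ hd) ++ pvBody (p :: run2) := by rw [this]
            _ = _ := by rw [hbody]; simp [List.append_assoc]
        cases hr2 : rest2 with
        | nil =>
          -- last run of the input
          rw [List.splitBy_nil]
          simp only [pvRenderRuns, pvRenderRun, List.isEmpty_nil]
          by_cases hpg : p.2 = []
          · rw [if_pos hpg, hbody']
            rw [PySem.Chars.join_singleton]
            simp [hpg, hhd, hX, pvBody, List.append_assoc]
          · rw [if_neg hpg, hbody', pvDropTwo]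
            rw [PySem.Chars.join_singleton]
            have : p.2.isEmpty = false := by simpa using hpg
            simp [this, hhd, hX, pvBody, List.append_assoc]
        | cons r rest' =>
          -- more runs follow
          rw [hbody', pvDropTwo]
          have hsb : (r :: rest').splitBy (fun a b => a.2 == b.2) ≠ [] :=
            List.splitBy_ne_nil.2 (by simp)
          cases hsb2 : (r :: rest').splitBy (fun a b => a.2 == b.2) with
          | nil => exact absurd hsb2 hsb
          | cons grp grps =>
            simp only [pvRenderRuns, pvRenderRun, List.isEmpty_cons, Bool.false_and]
            rw [PySem.Chars.join_cons_cons]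
            simp [hhd, hX, pvBody, List.append_assoc]

theorem inst2str_spec : Claim_equal_inst2str := by
  intro instances _ hpre
  unfold Spec_inst2str
  cases instances with
  | nil => exact absurd rfl hpre
  | cons p tl =>
    show String.ofList
        (let st := (p :: tl).foldl pvStepA (p.2,
           if p.2 = [] then []
           else '<' :: (PySem.Chars.join [','] (p.2.map String.toList) ++ [':', ' ']));
         if st.1 = [] then st.2 else PySem.List.slice st.2 none (some (-2)) ++ ['>'])
      = String.ofList (PySem.Chars.join [';', ' ']
          (pvRenderRuns true ((p :: tl).splitBy (fun a b => a.2 == b.2))))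
    rw [pvMain (p :: tl).length (p :: tl) le_rfl p.2, pvSplitBy_cons]
    congr 1
    have htw : (p :: tl).takeWhile (fun q => q.2 == p.2)
        = p :: tl.takeWhile (fun q => q.2 == p.2) := by
      simp
    have hdw : (p :: tl).dropWhile (fun q => q.2 == p.2)
        = tl.dropWhile (fun q => q.2 == p.2) := by
      simp
    rw [htw, hdw]
    set run2 := tl.takeWhile (fun q => q.2 == p.2) with hrun2
    set rest2 := tl.dropWhile (fun q => q.2 == p.2) with hrest2
    have hbody : pvBody (p :: run2)
        = PySem.Chars.join [';', ' '] ((p :: run2).map (fun q => pvInstT q.1)) ++ [';', ' '] :=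
      pvBody_eq_join _ (by simp)
    have hsl : (if p.2 = [] then []
          else '<' :: (PySem.Chars.join [','] (p.2.map String.toList) ++ [':', ' ']))
          ++ pvBody (p :: run2)
        = ((if p.2 = [] then []
            else '<' :: (PySem.Chars.join [','] (p.2.map String.toList) ++ [':', ' ']))
           ++ PySem.Chars.join [';', ' '] ((p :: run2).map (fun q => pvInstT q.1))) ++ [';', ' '] := by
      rw [hbody]; simp [List.append_assoc]
    cases hr2 : rest2 with
    | nil =>
      rw [List.splitBy_nil]
      simp only [pvRenderRuns, pvRenderRun, List.isEmpty_nil, Bool.true_and]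
      rw [PySem.Chars.join_singleton]
      by_cases hpg : p.2 = []
      · have hie : p.2.isEmpty = true := by simp [hpg]
        rw [if_pos hpg, hbody]
        simp [hie]
        exact hpg
      · have hie : p.2.isEmpty = false := by simpa using hpg
        rw [if_neg hpg, hsl, pvDropTwo]
        simp [hie, hpg, List.append_assoc]
    | cons r rest' =>
      have hsb : (r :: rest').splitBy (fun a b => a.2 == b.2) ≠ [] :=
        List.splitBy_ne_nil.2 (by simp)
      cases hsb2 : (r :: rest').splitBy (fun a b => a.2 == b.2) with
      | nil => exact absurd hsb2 hsb
      | cons grp grps =>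
        rw [hsl, pvDropTwo]
        simp only [pvRenderRuns, pvRenderRun, List.isEmpty_cons, Bool.false_and]
        rw [PySem.Chars.join_cons_cons]
        by_cases hpg : p.2 = []
        · simp [hpg, List.append_assoc]
        · have hie : p.2.isEmpty = false := by simpa using hpg
          simp [hie, hpg, List.append_assoc]
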